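-- pv_equiv track=rewrite | github.com/nathaditya543/Cryptography | DA1/server.py | index_to_rgb
-- ===== SOURCE A (Python) =====
-- def index_to_rgb(indices, rgb_muls, rgb_steps):
--     rgb_values = [];
--     ctr = 0
--     for i in indices:
--         r = i^rgb_muls[(0 + ctr) % 3] + 0
--         g = i^rgb_muls[(1 + ctr) % 3] + 0
--         b = i^rgb_muls[(2 + ctr) % 3] + 0
--         rgb_muls[0] += rgb_steps[0]
--         rgb_muls[1] += rgb_steps[1]
--         rgb_muls[2] += rgb_steps[2]
--
--         rgb_values.append((r,g,b))
--         ctr += 1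
--     return rgb_values
-- ===== SOURCE B (Python) =====
-- def index_to_rgb(indices, rgb_muls, rgb_steps):
--     # return value per element in closed form from the ORIGINAL multipliers;
--     # the loop does not mutate rgb_muls, the accumulated side effect is applied once at the end
--     base = rgb_muls[:3]
--     out = [(i ^ (base[ctr % 3] + ctr * rgb_steps[ctr % 3]),
--             i ^ (base[(1 + ctr) % 3] + ctr * rgb_steps[(1 + ctr) % 3]),
--             i ^ (base[(2 + ctr) % 3] + ctr * rgb_steps[(2 + ctr) % 3]))
--            for ctr, i in enumerate(indices)]
--     if indices:
--         for j in range(3):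
--             rgb_muls[j] += rgb_steps[j] * len(indices)
--     return out
-- ===== Notes on version B (the rewrite author's own statement) =====
-- stated objective: alternative
-- what changed: B replaces A's loop-carried mutating multiplier state with a single map over enumerate(indices) that computes each channel's multiplier in closed form from a snapshot of the original rgb_muls (base[(c+ctr)%3] + ctr*steps[(c+ctr)%3]), applying the accumulated in-place update of rgb_muls once after the loop.
import Mathlib
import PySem

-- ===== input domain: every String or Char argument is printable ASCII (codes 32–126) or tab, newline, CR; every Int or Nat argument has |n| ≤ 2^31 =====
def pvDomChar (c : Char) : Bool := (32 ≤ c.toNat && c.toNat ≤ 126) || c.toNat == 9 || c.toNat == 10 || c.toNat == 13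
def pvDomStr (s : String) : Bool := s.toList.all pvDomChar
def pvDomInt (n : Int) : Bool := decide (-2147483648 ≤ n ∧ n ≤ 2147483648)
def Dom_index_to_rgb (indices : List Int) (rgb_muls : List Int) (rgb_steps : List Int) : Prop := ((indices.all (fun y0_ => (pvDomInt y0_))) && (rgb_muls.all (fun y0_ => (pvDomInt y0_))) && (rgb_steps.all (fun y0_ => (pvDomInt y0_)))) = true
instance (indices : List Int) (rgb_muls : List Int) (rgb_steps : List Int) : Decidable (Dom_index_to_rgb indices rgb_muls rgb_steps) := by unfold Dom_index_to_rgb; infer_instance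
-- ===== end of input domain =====

-- B computes each channel's multiplier in closed form from the original rgb_muls (no evolving
-- per-iteration mutation of the multipliers); equivalence is about the RETURN value only —
-- A mutates rgb_muls in place during the loop, B applies the same net mutation once after it.


-- ===== PORT A =====
-- A's loop: state = (accumulated list, mutated rgb_muls, counter); emitted structurally.
def indexToRgbGoA (indices : List Int) (rgb_muls : List Int) (rgb_steps : List Int)
    (ctr : Int) : List (Int × Int × Int) :=
  match indices with
  | [] => []
  | i :: rest =>
    let r := PySem.Int.bxor i (PySem.List.pyGetD rgb_muls (PySem.Int.mod (0 + ctr) 3) 0 + 0)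
    let g := PySem.Int.bxor i (PySem.List.pyGetD rgb_muls (PySem.Int.mod (1 + ctr) 3) 0 + 0)
    let b := PySem.Int.bxor i (PySem.List.pyGetD rgb_muls (PySem.Int.mod (2 + ctr) 3) 0 + 0)
    let m1 := rgb_muls.set 0 (PySem.List.pyGetD rgb_muls 0 0 + PySem.List.pyGetD rgb_steps 0 0)
    let m2 := m1.set 1 (PySem.List.pyGetD m1 1 0 + PySem.List.pyGetD rgb_steps 1 0)
    let m3 := m2.set 2 (PySem.List.pyGetD m2 2 0 + PySem.List.pyGetD rgb_steps 2 0)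
    (r, g, b) :: indexToRgbGoA rest m3 rgb_steps (ctr + 1)

def index_to_rgb (indices : List Int) (rgb_muls : List Int) (rgb_steps : List Int) : List (Int × Int × Int) :=
  indexToRgbGoA indices rgb_muls rgb_steps 0

-- ===== PORT B =====
-- B: base = rgb_muls[:3]; one map over enumerate(indices) with closed-form multipliers.
def indexToRgbElemB (base : List Int) (rgb_steps : List Int) (p : Int × Int) : Int × Int × Int :=
  let ctr := p.1
  let i := p.2
  (PySem.Int.bxor i (PySem.List.pyGetD base (PySem.Int.mod ctr 3) 0 + ctr * PySem.List.pyGetD rgb_steps (PySem.Int.mod ctr 3) 0),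
   PySem.Int.bxor i (PySem.List.pyGetD base (PySem.Int.mod (1 + ctr) 3) 0 + ctr * PySem.List.pyGetD rgb_steps (PySem.Int.mod (1 + ctr) 3) 0),
   PySem.Int.bxor i (PySem.List.pyGetD base (PySem.Int.mod (2 + ctr) 3) 0 + ctr * PySem.List.pyGetD rgb_steps (PySem.Int.mod (2 + ctr) 3) 0))

def index_to_rgb_alt (indices : List Int) (rgb_muls : List Int) (rgb_steps : List Int) : List (Int × Int × Int) :=
  let base := PySem.List.slice rgb_muls none (some 3)
  (PySem.List.enumerate indices 0).map (indexToRgbElemB base rgb_steps)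

-- ===== PRECONDITION & SPEC =====
-- Pre_ excludes exactly the inputs where A raises IndexError: a nonempty indices list with
-- fewer than 3 multipliers or fewer than 3 steps.
def Pre_index_to_rgb (indices : List Int) (rgb_muls : List Int) (rgb_steps : List Int) : Prop :=
  indices = [] ∨ (3 ≤ rgb_muls.length ∧ 3 ≤ rgb_steps.length)
instance (indices : List Int) (rgb_muls : List Int) (rgb_steps : List Int) : Decidable (Pre_index_to_rgb indices rgb_muls rgb_steps) := by unfold Pre_index_to_rgb; infer_instance

def pvWitness_index_to_rgb : List Int × List Int × List Int := ([5, 7, 9], [2, 3, 4], [1, 1, 2])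

def Spec_index_to_rgb (indices : List Int) (rgb_muls : List Int) (rgb_steps : List Int) (out : List (Int × Int × Int)) : Prop := out = index_to_rgb_alt indices rgb_muls rgb_steps
instance (indices : List Int) (rgb_muls : List Int) (rgb_steps : List Int) (out : List (Int × Int × Int)) : Decidable (Spec_index_to_rgb indices rgb_muls rgb_steps out) := by unfold Spec_index_to_rgb; infer_instance

-- ===== CLAIM (what is proved, stated in full; the proofs are below) =====
def Claim_equal_index_to_rgb : Prop := ∀ (indices : List Int) (rgb_muls : List Int) (rgb_steps : List Int), Dom_index_to_rgb indices rgb_muls rgb_steps → Pre_index_to_rgb indices rgb_muls rgb_steps → Spec_index_to_rgb indices rgb_muls rgb_steps (index_to_rgb indices rgb_muls rgb_steps)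

-- ===== LEMMAS AND PROOFS =====

-- net effect of one iteration's three slot updates on the first three multipliers
lemma getD_after_step (muls steps : List Int) (hm : 3 ≤ muls.length) (j : Nat) (hj : j < 3) :
    ((((muls.set 0 (PySem.List.pyGetD muls 0 0 + PySem.List.pyGetD steps 0 0)).set 1
        (PySem.List.pyGetD (muls.set 0 (PySem.List.pyGetD muls 0 0 + PySem.List.pyGetD steps 0 0)) 1 0 + PySem.List.pyGetD steps 1 0)).set 2
        (PySem.List.pyGetD ((muls.set 0 (PySem.List.pyGetD muls 0 0 + PySem.List.pyGetD steps 0 0)).set 1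
          (PySem.List.pyGetD (muls.set 0 (PySem.List.pyGetD muls 0 0 + PySem.List.pyGetD steps 0 0)) 1 0 + PySem.List.pyGetD steps 1 0)) 2 0 + PySem.List.pyGetD steps 2 0)).getD j 0)
      = muls.getD j 0 + steps.getD j 0 := by
  match muls, hm with
  | a :: b :: c :: t, _ =>
    interval_cases j <;> simp [pysem, List.getD]

-- loop invariant: after k iterations the multipliers are base + k·steps on the three read slots,
-- so A's remaining loop equals B's map over the remaining enumerated indices
lemma goA_eq_map (indices : List Int) (muls base steps : List Int) (k : Nat)
    (hm : 3 ≤ muls.length)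
    (hinv : ∀ j : Nat, j < 3 → muls.getD j 0 = base.getD j 0 + (k : Int) * steps.getD j 0) :
    indexToRgbGoA indices muls steps (k : Int)
      = (PySem.List.enumerate indices (k : Int)).map (indexToRgbElemB base steps) := by
  induction indices generalizing muls k with
  | nil => simp [indexToRgbGoA]
  | cons i rest ih =>
    rw [indexToRgbGoA, PySem.List.enumerate_cons, List.map_cons]
    have h0 := hinv (k % 3) (Nat.mod_lt _ (by omega))
    have h1 := hinv ((1 + k) % 3) (Nat.mod_lt _ (by omega))
    have h2 := hinv ((2 + k) % 3) (Nat.mod_lt _ (by omega))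
    congr 1
    · show (_, _, _) = indexToRgbElemB base steps ((k : Int), i)
      simp only [indexToRgbElemB]
      have e0 : PySem.Int.mod (0 + (k : Int)) 3 = ((k % 3 : Nat) : Int) := by
        rw [zero_add]; exact_mod_cast PySem.Int.mod_natCast k 3
      have e1 : PySem.Int.mod (1 + (k : Int)) 3 = (((1 + k) % 3 : Nat) : Int) := by
        have : (1 : Int) + (k : Int) = (((1 + k : Nat)) : Int) := by push_cast; ring
        rw [this]; exact_mod_cast PySem.Int.mod_natCast (1 + k) 3
      have e2 : PySem.Int.mod (2 + (k : Int)) 3 = (((2 + k) % 3 : Nat) : Int) := by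
        have : (2 : Int) + (k : Int) = (((2 + k : Nat)) : Int) := by push_cast; ring
        rw [this]; exact_mod_cast PySem.Int.mod_natCast (2 + k) 3
      have ek : PySem.Int.mod (k : Int) 3 = ((k % 3 : Nat) : Int) := by
        exact_mod_cast PySem.Int.mod_natCast k 3
      rw [e0, e1, e2, ek]
      simp only [PySem.List.pyGetD_natCast, add_zero]
      rw [h0, h1, h2]
    · have e1 : ((k : Int) + 1) = (((k + 1 : Nat)) : Int) := by push_cast; ring
      rw [e1, ih]
      · simpa using hm
      · intro j hj
        rw [getD_after_step muls steps hm j hj, hinv j hj]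
        push_cast; ring

-- rgb_muls[:3] agrees with rgb_muls on the three read slots
lemma getD_slice_to_three (muls : List Int) (j : Nat) (hj : j < 3) :
    (PySem.List.slice muls none (some 3)).getD j 0 = muls.getD j 0 := by
  rw [PySem.List.slice_to _ (by norm_num)]
  simp [List.getD, hj]

-- ===== VERDICT (by name: the statement is the Claim_ definition above) =====
theorem index_to_rgb_spec : Claim_equal_index_to_rgb := by
  intro indices rgb_muls rgb_steps _ hpre
  unfold Spec_index_to_rgb index_to_rgb index_to_rgb_alt
  rcases hpre with hnil | ⟨hm, _⟩
  · subst hnil; simp [indexToRgbGoA]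
  · have : (0 : Int) = ((0 : Nat) : Int) := rfl
    rw [this, goA_eq_map indices rgb_muls (PySem.List.slice rgb_muls none (some 3)) rgb_steps 0 hm]
    intro j hj
    rw [getD_slice_to_three rgb_muls j hj]
    push_cast; ring
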